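-- pv_equiv track=rewrite | github.com/SWE-Team-Bravo/RollCall | services/audit_log_viewer.py | get_audit_detail_columns
-- ===== SOURCE A (Python) =====
-- def get_audit_detail_columns(detail_rows: list[dict[str, str]]) -> list[str]:
--     columns = ["Detail"]
--     columns.extend(
--         column
--         for column in ("Before", "After", "Value")
--         if any(row.get(column) for row in detail_rows)
--     )
--     return columns
-- ===== SOURCE B (Python) =====
-- def get_audit_detail_columns(detail_rows: list[dict[str, str]]) -> list[str]:
--     has_before = has_after = has_value = False
--     for row in detail_rows:
--         if row.get("Before"):
--             has_before = True
--         if row.get("After"):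
--             has_after = True
--         if row.get("Value"):
--             has_value = True
--     columns = ["Detail"]
--     if has_before:
--         columns.append("Before")
--     if has_after:
--         columns.append("After")
--     if has_value:
--         columns.append("Value")
--     return columns
-- ===== Notes on version B (the rewrite author's own statement) =====
-- stated objective: alternative
-- what changed: Replaces three per-column any() scans over detail_rows by a single pass that sets three flags per row, then appends the column names in fixed order from the flags.
import Mathlib
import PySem

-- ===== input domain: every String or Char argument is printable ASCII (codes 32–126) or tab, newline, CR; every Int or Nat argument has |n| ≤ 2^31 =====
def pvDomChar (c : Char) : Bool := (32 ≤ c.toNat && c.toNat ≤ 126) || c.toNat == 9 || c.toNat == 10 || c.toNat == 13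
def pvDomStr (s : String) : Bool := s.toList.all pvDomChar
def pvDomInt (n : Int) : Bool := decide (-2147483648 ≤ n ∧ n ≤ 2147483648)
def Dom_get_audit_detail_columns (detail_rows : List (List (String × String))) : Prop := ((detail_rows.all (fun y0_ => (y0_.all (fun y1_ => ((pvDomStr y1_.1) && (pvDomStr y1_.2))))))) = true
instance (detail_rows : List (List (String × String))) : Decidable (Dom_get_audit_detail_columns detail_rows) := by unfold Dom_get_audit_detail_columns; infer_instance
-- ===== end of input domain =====

-- B replaces A's three per-column any() scans by one pass over the rows that sets three flags,
-- then appends the column names in fixed order from the flags (objective: alternative decomposition).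

-- ===== PORT A =====
-- truthiness of row.get(column): None and "" are falsy
def pvTruthy (o : Option String) : Bool :=
  match o with
  | none => false
  | some s => s ≠ ""

def get_audit_detail_columns (detail_rows : List (List (String × String))) : List String :=
  let columns := ["Detail"]
  columns ++ (["Before", "After", "Value"].filter
    (fun column => detail_rows.any (fun row => pvTruthy (PySem.Dict.get? (PySem.Dict.mk row) column))))

-- ===== PORT B =====
-- one pass: fold the three flags over the rows
def pvFlagStep (f : Bool × Bool × Bool) (row : List (String × String)) : Bool × Bool × Bool :=
  (if pvTruthy (PySem.Dict.get? (PySem.Dict.mk row) "Before") then true else f.1,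
   if pvTruthy (PySem.Dict.get? (PySem.Dict.mk row) "After") then true else f.2.1,
   if pvTruthy (PySem.Dict.get? (PySem.Dict.mk row) "Value") then true else f.2.2)

def get_audit_detail_columns_alt (detail_rows : List (List (String × String))) : List String :=
  let flags := detail_rows.foldl pvFlagStep (false, false, false)
  let columns := ["Detail"]
  let columns := if flags.1 then columns ++ ["Before"] else columns
  let columns := if flags.2.1 then columns ++ ["After"] else columns
  let columns := if flags.2.2 then columns ++ ["Value"] else columns
  columns

-- ===== PRECONDITION & SPEC =====
def Spec_get_audit_detail_columns (detail_rows : List (List (String × String))) (out : List String) : Prop := out = get_audit_detail_columns_alt detail_rows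
instance (detail_rows : List (List (String × String))) (out : List String) : Decidable (Spec_get_audit_detail_columns detail_rows out) := by unfold Spec_get_audit_detail_columns; infer_instance

-- ===== CLAIM (what is proved, stated in full; the proofs are below) =====
def Claim_equal_get_audit_detail_columns : Prop := ∀ (detail_rows : List (List (String × String))), Dom_get_audit_detail_columns detail_rows → Spec_get_audit_detail_columns detail_rows (get_audit_detail_columns detail_rows)

-- ===== LEMMAS AND PROOFS =====

-- the one-pass fold computes the three any()s
theorem flags_eq (rows : List (List (String × String))) (b1 b2 b3 : Bool) :
    rows.foldl pvFlagStep (b1, b2, b3)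
    = (b1 || rows.any (fun row => pvTruthy (PySem.Dict.get? (PySem.Dict.mk row) "Before")),
       b2 || rows.any (fun row => pvTruthy (PySem.Dict.get? (PySem.Dict.mk row) "After")),
       b3 || rows.any (fun row => pvTruthy (PySem.Dict.get? (PySem.Dict.mk row) "Value"))) := by
  induction rows generalizing b1 b2 b3 with
  | nil => simp
  | cons r rs ih =>
    simp only [List.foldl_cons, List.any_cons, ih, pvFlagStep]
    cases h1 : pvTruthy (PySem.Dict.get? (PySem.Dict.mk r) "Before") <;>
    cases h2 : pvTruthy (PySem.Dict.get? (PySem.Dict.mk r) "After") <;>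
    cases h3 : pvTruthy (PySem.Dict.get? (PySem.Dict.mk r) "Value") <;> simp

-- ===== VERDICT (by name: the statement is the Claim_ definition above) =====
theorem get_audit_detail_columns_spec : Claim_equal_get_audit_detail_columns := by
  intro rows _
  unfold Spec_get_audit_detail_columns get_audit_detail_columns get_audit_detail_columns_alt
  simp only [flags_eq, Bool.false_or]
  cases h1 : rows.any (fun row => pvTruthy (PySem.Dict.get? (PySem.Dict.mk row) "Before")) <;>
  cases h2 : rows.any (fun row => pvTruthy (PySem.Dict.get? (PySem.Dict.mk row) "After")) <;>
  cases h3 : rows.any (fun row => pvTruthy (PySem.Dict.get? (PySem.Dict.mk row) "Value")) <;>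
    simp [List.filter, h1, h2, h3]
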